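-- pv_equiv track=rewrite | github.com/glushenkovIG/PythonTasks | sorts/n.py | Skises
-- ===== SOURCE A (Python) =====
-- def Skises(SKI, SIZES):
--     amount = 0
--     SKI.sort()
--     SIZES.sort()
--     a = len(SIZES)
--     while len(SKI) != 0 and len(SIZES) != 0:
--         if SIZES[0] <= SKI[0]:
--             amount += 1
--             SIZES.pop(0)
--             SKI.pop(0)
--         else:
--             SKI.pop(0)
--     return amount
-- ===== SOURCE B (Python) =====
-- def Skises(SKI, SIZES):
--     # NOTE: return-value equivalence only; A sorts/empties its arguments in place, B leaves them untouched.
--     ski = sorted(SKI)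
--     sizes = sorted(SIZES)
--     j = 0
--     for s in ski:
--         if j < len(sizes) and sizes[j] <= s:
--             j += 1
--     return j
-- ===== Notes on version B (the rewrite author's own statement) =====
-- stated objective: faster
-- what changed: Replaces the destructive while-loop that pops the front of both lists (each pop(0) is O(n)) with a single index pointer advanced over the sorted sizes during one pass over the sorted skis.
import Mathlib
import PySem

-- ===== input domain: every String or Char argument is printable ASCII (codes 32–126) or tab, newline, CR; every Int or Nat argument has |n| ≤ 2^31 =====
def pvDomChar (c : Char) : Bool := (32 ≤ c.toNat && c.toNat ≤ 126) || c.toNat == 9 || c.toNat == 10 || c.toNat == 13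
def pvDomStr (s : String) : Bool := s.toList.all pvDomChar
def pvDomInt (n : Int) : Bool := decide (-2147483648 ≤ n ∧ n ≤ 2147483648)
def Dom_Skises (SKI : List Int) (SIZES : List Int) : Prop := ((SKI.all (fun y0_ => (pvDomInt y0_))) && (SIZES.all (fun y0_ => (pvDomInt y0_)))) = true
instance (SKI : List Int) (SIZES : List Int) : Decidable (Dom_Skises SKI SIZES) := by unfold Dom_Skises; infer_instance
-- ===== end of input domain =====

-- B replaces A's destructive pop(0)-based while-loop with a one-pass index pointer over
-- the sorted arrays (faster). Return-value equivalence only: A sorts and empties its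
-- argument lists in place; B does not mutate its arguments.


-- ===== PORT A =====
-- the while-loop: pops the head of SKI each step, also popping SIZES and counting on a match
def SkisesLoop : List Int → List Int → Int → Int
  | [], _, amount => amount
  | _ :: _, [], amount => amount
  | sk :: SKI, sz :: SIZES, amount =>
    if sz ≤ sk then SkisesLoop SKI SIZES (amount + 1)
    else SkisesLoop SKI (sz :: SIZES) amount

def Skises (SKI : List Int) (SIZES : List Int) : Int :=
  SkisesLoop (PySem.List.sorted SKI (fun x => x) false)
             (PySem.List.sorted SIZES (fun x => x) false) 0

-- ===== PORT B =====
-- the for-loop over sorted skis with the index pointer j into sorted sizes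
def SkisesAltLoop (sizes : List Int) : List Int → Int → Int
  | [], j => j
  | s :: rest, j =>
    if j < (sizes.length : Int) ∧ (PySem.List.pyGet? sizes j).getD 0 ≤ s then
      SkisesAltLoop sizes rest (j + 1)
    else
      SkisesAltLoop sizes rest j

def Skises_alt (SKI : List Int) (SIZES : List Int) : Int :=
  SkisesAltLoop (PySem.List.sorted SIZES (fun x => x) false)
                (PySem.List.sorted SKI (fun x => x) false) 0

-- ===== PRECONDITION & SPEC =====
def Spec_Skises (SKI : List Int) (SIZES : List Int) (out : Int) : Prop := out = Skises_alt SKI SIZES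
instance (SKI : List Int) (SIZES : List Int) (out : Int) : Decidable (Spec_Skises SKI SIZES out) := by unfold Spec_Skises; infer_instance

-- ===== CLAIM (what is proved, stated in full; the proofs are below) =====
def Claim_equal_Skises : Prop := ∀ (SKI : List Int) (SIZES : List Int), Dom_Skises SKI SIZES → Spec_Skises SKI SIZES (Skises SKI SIZES)

-- ===== LEMMAS AND PROOFS =====

-- B's pointer j into `sizes` tracks A's loop running on the suffix `sizes.drop j`,
-- with the accumulated count equal to j.
theorem altLoop_eq_loop (sizes : List Int) :
    ∀ (ski : List Int) (j : Nat), j ≤ sizes.length →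
      SkisesAltLoop sizes ski (j : Int) = SkisesLoop ski (sizes.drop j) (j : Int) := by
  intro ski
  induction ski with
  | nil =>
    intro j hj
    simp [SkisesAltLoop, SkisesLoop]
  | cons s rest ih =>
    intro j hj
    rcases Nat.lt_or_ge j sizes.length with hlt | hge
    · have hget : PySem.List.pyGet? sizes (j : Int) = some sizes[j] :=
        PySem.List.pyGet?_ofNat sizes j hlt
      have hdrop : sizes.drop j = sizes[j] :: sizes.drop (j + 1) :=
        List.drop_eq_getElem_cons hlt
      by_cases hc : sizes[j] ≤ s
      · have : SkisesAltLoop sizes (s :: rest) (j : Int)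
            = SkisesAltLoop sizes rest ((j : Int) + 1) := by
          simp [SkisesAltLoop, hget, hc, hlt]
        rw [this, hdrop]
        have h1 : ((j : Int) + 1) = ((j + 1 : Nat) : Int) := by push_cast; ring
        rw [h1, ih (j + 1) hlt]
        simp [SkisesLoop, hc]
      · have : SkisesAltLoop sizes (s :: rest) (j : Int)
            = SkisesAltLoop sizes rest (j : Int) := by
          simp [SkisesAltLoop, hget, hc]
        rw [this, ih j hj, hdrop]
        simp [SkisesLoop, hc, ← hdrop]
    · have hj' : j = sizes.length := le_antisymm hj hge
      have hdrop : sizes.drop j = [] := by simp [hj']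
      have hcond : ¬ ((j : Int) < (sizes.length : Int)) := by omega
      have : SkisesAltLoop sizes (s :: rest) (j : Int)
          = SkisesAltLoop sizes rest (j : Int) := by
        simp [SkisesAltLoop, hcond]
      rw [this, ih j hj, hdrop]
      cases rest <;> simp [SkisesLoop]

-- ===== VERDICT (by name: the statement is the Claim_ definition above) =====
theorem Skises_spec : Claim_equal_Skises := by
  intro SKI SIZES _
  unfold Spec_Skises Skises Skises_alt
  have h := altLoop_eq_loop (PySem.List.sorted SIZES (fun x => x) false)
    (PySem.List.sorted SKI (fun x => x) false) 0 (Nat.zero_le _)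
  simpa using h.symm
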